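-- pv_equiv track=rewrite | github.com/harshitsharma-dev/AI_AGENT_WITH_MCP | python_agent/app.py | _extract_names_simple
-- ===== SOURCE A (Python) =====
-- from typing import List, Dict, Any, Optional, Set, Tuple
--
-- def _extract_names_simple(query: str) -> Tuple[List[str], List[str]]:
--     """Simple name extraction without spaCy"""
--     words = query.split()
--     names = []
--     search_terms = []
--
--     for word in words:
--         if word[0].isupper() and len(word) > 2 and word.isalpha():
--             if any(indicator in query.lower() for indicator in ['by ', 'author ', 'written by']):
--                 names.append(word)
--             else:
--                 search_terms.append(word)
--
--     return names, search_terms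
-- ===== SOURCE B (Python) =====
-- def _extract_names_simple(query):
--     """Simple name extraction without spaCy: a single character-level scan.
--
--     Instead of split() + per-word string tests, walk the characters once,
--     building the current word while tracking its qualification incrementally
--     (first char uppercase, all chars alphabetic, length > 2); a trailing
--     sentinel space flushes the last word.
--     """
--     cands = []
--     buf = ''
--     first_upper = False
--     all_alpha = True
--     for c in query + ' ':          # sentinel space flushes the final word
--         if c.isspace():
--             if buf:
--                 if first_upper and all_alpha and len(buf) > 2:
--                     cands.append(buf)
--                 buf = ''
--                 all_alpha = True
--         else:
--             if not buf:
--                 first_upper = c.isupper()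
--             if not c.isalpha():
--                 all_alpha = False
--             buf += c
--     if any(k in query.lower() for k in ('by ', 'author ', 'written by')):
--         return cands, []
--     return [], cands
-- ===== Notes on version B (the rewrite author's own statement) =====
-- stated objective: alternative
-- what changed: A splits the query into words and, per word, runs whole-word string tests and re-scans the query for author indicators; B never calls split(): it makes a single character-level scan that tokenizes and judges qualification incrementally with flags (first-char-upper, all-alpha, length), then routes the collected candidates with one author-indicator check.
import Mathlib
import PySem

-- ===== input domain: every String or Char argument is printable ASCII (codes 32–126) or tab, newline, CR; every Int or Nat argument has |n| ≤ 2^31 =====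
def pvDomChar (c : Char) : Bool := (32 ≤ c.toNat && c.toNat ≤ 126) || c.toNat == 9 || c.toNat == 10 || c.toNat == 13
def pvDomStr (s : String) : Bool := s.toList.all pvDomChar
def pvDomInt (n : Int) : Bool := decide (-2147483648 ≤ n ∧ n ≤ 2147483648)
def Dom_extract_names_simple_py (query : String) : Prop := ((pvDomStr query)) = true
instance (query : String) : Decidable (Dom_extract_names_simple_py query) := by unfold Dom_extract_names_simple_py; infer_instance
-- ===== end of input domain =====

-- B replaces A's split()-then-per-word-tests loop by a single character-level
-- scan that tokenizes and judges qualification incrementally; objective: alternative.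

-- the 'any(indicator in query.lower() ...)' author test, computed by both Pythons
def pvIsAuthor (query : String) : Bool :=
  ["by ", "author ", "written by"].any (fun ind => PySem.Str.isIn ind (PySem.Str.lower query))

-- ===== PORT A =====
-- A's per-word test: word[0].isupper() and len(word) > 2 and word.isalpha()
def pvQual (word : String) : Bool :=
  ((PySem.Str.pyGet? word 0).map PySem.Chars.isupper).getD false
    && PySem.Str.len word > 2 && PySem.Str.strIsalpha word

def extract_names_simple_py (query : String) : List String × List String :=
  let words := PySem.Str.split₀ query
  words.foldl (fun (st : List String × List String) word =>
    if pvQual word then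
      if pvIsAuthor query then (st.1 ++ [word], st.2)
      else (st.1, st.2 ++ [word])
    else st) ([], [])

-- ===== PORT B =====
-- B's character loop: state = (current word buffer, first_upper, all_alpha, candidates)
def pvScanB : List Char → List Char → Bool → Bool → List String → List String
  | [], _buf, _fu, _aa, cands => cands
  | c :: rest, buf, fu, aa, cands =>
    if PySem.Chars.isspace c then
      if buf.isEmpty then pvScanB rest buf fu aa cands
      else
        pvScanB rest [] fu true
          (if fu && aa && decide (buf.length > 2) then cands ++ [String.ofList buf] else cands)
    else
      pvScanB rest (buf ++ [c])
        (if buf.isEmpty then PySem.Chars.isupper c else fu)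
        (if PySem.Chars.isalpha c then aa else false) cands

def extract_names_simple_py_alt (query : String) : List String × List String :=
  let cands := pvScanB (query.toList ++ [' ']) [] false true []
  if pvIsAuthor query then (cands, []) else ([], cands)

-- ===== PRECONDITION & SPEC =====
def Spec_extract_names_simple_py (query : String) (out : List String × List String) : Prop := out = extract_names_simple_py_alt query
instance (query : String) (out : List String × List String) : Decidable (Spec_extract_names_simple_py query out) := by unfold Spec_extract_names_simple_py; infer_instance

-- ===== CLAIM (what is proved, stated in full; the proofs are below) =====
def Claim_equal_extract_names_simple_py : Prop := ∀ (query : String), Dom_extract_names_simple_py query → Spec_extract_names_simple_py query (extract_names_simple_py query)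

-- ===== LEMMAS AND PROOFS =====

-- A's qualification test at the character-list level
def pvQualL (bs : List Char) : Bool :=
  ((bs[0]?).map PySem.Chars.isupper).getD false
    && decide (bs.length > 2) && PySem.Chars.strIsalpha bs

theorem pvQual_ofList (bs : List Char) : pvQual (String.ofList bs) = pvQualL bs := by
  have hg : PySem.List.pyGet? bs 0 = bs[0]? := by
    simpa using PySem.List.pyGet?_natCast bs 0
  simp [pvQual, pvQualL, PySem.Str.len_eq, PySem.Str.strIsalpha_eq, hg]

-- A's branching loop, with both accumulators generalized, computes filtered appends
theorem pv_fold_eq (q : String) (ws : List String) (a b : List String) :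
    ws.foldl (fun (st : List String × List String) word =>
      if pvQual word then
        if pvIsAuthor q then (st.1 ++ [word], st.2)
        else (st.1, st.2 ++ [word])
      else st) (a, b)
    = if pvIsAuthor q then (a ++ ws.filter pvQual, b) else (a, b ++ ws.filter pvQual) := by
  induction ws generalizing a b with
  | nil => simp
  | cons w ws ih =>
    rw [List.foldl_cons]
    by_cases hq : pvQual w
    · by_cases ha : pvIsAuthor q
      · rw [if_pos hq, if_pos ha, ih]; simp [hq, ha]
      · rw [if_pos hq, if_neg ha, ih]; simp [hq, ha]
    · rw [if_neg hq, ih]; simp [hq]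

-- split₀.go's accumulator factors out
theorem pv_go_acc (cs : List Char) (cur : List Char) (acc : List (List Char)) :
    PySem.Chars.split₀.go cs cur acc = acc.reverse ++ PySem.Chars.split₀.go cs cur [] := by
  induction cs generalizing cur acc with
  | nil =>
    by_cases h : cur.isEmpty <;>
      simp only [PySem.Chars.split₀.go, h, if_true, Bool.false_eq_true, if_false] <;> simp
  | cons c cs ih =>
    by_cases hs : PySem.Chars.isspace c
    · by_cases he : cur.isEmpty
      · simp only [PySem.Chars.split₀.go, hs, he, if_true]
        exact ih [] acc
      · simp only [PySem.Chars.split₀.go, hs, he, if_true, if_false, Bool.false_eq_true]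
        rw [ih _ (cur.reverse :: acc), ih _ [cur.reverse]]
        simp
    · simp only [PySem.Chars.split₀.go, hs, if_false, Bool.false_eq_true]
      exact ih _ _

-- the flush condition agrees with A's per-word test
theorem pv_flush_cond (buf : List Char) (fu aa : Bool)
    (hne : buf ≠ [])
    (hfu : fu = ((buf[0]?).map PySem.Chars.isupper).getD false)
    (haa : aa = buf.all PySem.Chars.isalpha) :
    (fu && aa && decide (buf.length > 2)) = pvQualL buf := by
  subst hfu haa
  rcases buf with _ | ⟨c, rest⟩
  · exact absurd rfl hne
  simp only [pvQualL, PySem.Chars.strIsalpha, List.isEmpty_cons, Bool.not_false,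
    Bool.true_and, List.getElem?_cons_zero, Option.map_some, Option.getD_some]
  exact Bool.and_right_comm _ _ _

-- B's scanner = the filtered word list of split₀.go, for any invariant-respecting state
theorem pv_scan_eq (cs : List Char) (buf : List Char) (fu aa : Bool) (cands : List String)
    (haa : aa = buf.all PySem.Chars.isalpha)
    (hfu : buf ≠ [] → fu = ((buf[0]?).map PySem.Chars.isupper).getD false) :
    pvScanB (cs ++ [' ']) buf fu aa cands
      = cands ++ ((PySem.Chars.split₀.go cs buf.reverse []).filter pvQualL).map String.ofList := by
  induction cs generalizing buf fu aa cands with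
  | nil =>
    by_cases he : buf = []
    · subst he
      simp [pvScanB, PySem.Chars.split₀.go, PySem.Chars.isspace]
    · have hsp : PySem.Chars.isspace ' ' = true := by decide
      have hbe : buf.isEmpty = false := by simpa [List.isEmpty_eq_false_iff] using he
      simp only [List.nil_append, pvScanB, hsp, if_true, hbe, Bool.false_eq_true, if_false]
      rw [pv_flush_cond buf fu aa he (hfu he) haa]
      have hre : buf.reverse.isEmpty = false := by
        simpa [List.isEmpty_eq_false_iff] using he
      simp [PySem.Chars.split₀.go, hre]
      by_cases hq : pvQualL buf = true <;> simp [hq]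
  | cons c cs ih =>
    by_cases hs : PySem.Chars.isspace c
    · by_cases he : buf = []
      · subst he
        simp only [List.all_nil] at haa
        subst haa
        simp only [List.cons_append, pvScanB, hs, if_true, List.isEmpty_nil]
        rw [ih [] fu true cands rfl (by simp)]
        simp [PySem.Chars.split₀.go, hs]
      · have hbe : buf.isEmpty = false := by simpa [List.isEmpty_eq_false_iff] using he
        simp only [List.cons_append, pvScanB, hs, if_true, hbe, Bool.false_eq_true, if_false]
        rw [ih [] fu true _ rfl (by simp)]
        rw [pv_flush_cond buf fu aa he (hfu he) haa]
        have hre : buf.reverse.isEmpty = false := by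
          simpa [List.isEmpty_eq_false_iff] using he
        simp only [PySem.Chars.split₀.go, hs, if_true, hre, Bool.false_eq_true, if_false]
        rw [pv_go_acc cs [] [buf.reverse.reverse]]
        by_cases hq : pvQualL buf = true <;> simp [hq]
    · simp only [List.cons_append, pvScanB, hs, Bool.false_eq_true, if_false]
      rw [ih (buf ++ [c]) _ _ cands]
      · simp [PySem.Chars.split₀.go, hs]
      · subst haa
        by_cases ha : PySem.Chars.isalpha c <;> simp [ha]
      · intro _
        by_cases he : buf = []
        · subst he; simp
        · have hbe : buf.isEmpty = false := by simpa [List.isEmpty_eq_false_iff] using he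
          simp [hbe, List.length_pos_of_ne_nil he, hfu he]

-- B's candidate list is A's filtered word list
theorem pv_cands_eq (q : String) :
    pvScanB (q.toList ++ [' ']) [] false true []
      = (PySem.Str.split₀ q).filter pvQual := by
  rw [pv_scan_eq q.toList [] false true [] rfl (by simp)]
  show _ = ((PySem.Chars.split₀.go q.toList [] []).map String.ofList).filter pvQual
  rw [List.filter_map]
  simp [Function.comp_def, pvQual_ofList]

-- ===== VERDICT (by name: the statement is the Claim_ definition above) =====
theorem extract_names_simple_py_spec : Claim_equal_extract_names_simple_py := by
  intro query _
  show extract_names_simple_py query = extract_names_simple_py_alt query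
  unfold extract_names_simple_py extract_names_simple_py_alt
  simp only [pv_fold_eq, pv_cands_eq]
  by_cases ha : pvIsAuthor query <;> simp [ha]
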